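-- pv_equiv track=rewrite | github.com/shyamr586/leetcode-stuff | others/maximum_occuring_digits.py | solution
-- ===== SOURCE A (Python) =====
-- def solution(a):
--     a = [str(num) for num in a]
--     nums = "".join(a)
--     counter = {}
--
--     for digit in nums:
--         if digit not in counter:
--             counter[digit] = 1
--         else:
--             counter[digit]+=1
--
--     max_occured = max(counter.values())
--
--     list_of_index = [int(x) for x in counter.keys() if counter[x]==max_occured]
--     return sorted(list_of_index)
-- ===== SOURCE B (Python) =====
-- def solution(a):
--     s = "".join(str(n) for n in a)
--     counts = [(d, sum(ch == str(d) for ch in s)) for d in range(10)]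
--     m = max(c for _, c in counts)
--     return [d for d, c in counts if c == m]
-- ===== Notes on version B (the rewrite author's own statement) =====
-- stated objective: alternative
-- what changed: B replaces A's dict-of-character-counts, max over dict values, int() parsing of winning keys and final sort by a fixed table over the ten possible digits: count each digit's occurrences in the joined string, take the max, and emit winning digits in ascending range(10) order, needing no dict, no parsing and no sort.
-- outside the precondition, e.g. on solution([]): A raises ValueError, B returns [0, 1, 2, 3, 4, 5, 6, 7, 8, 9]
import Mathlib
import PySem

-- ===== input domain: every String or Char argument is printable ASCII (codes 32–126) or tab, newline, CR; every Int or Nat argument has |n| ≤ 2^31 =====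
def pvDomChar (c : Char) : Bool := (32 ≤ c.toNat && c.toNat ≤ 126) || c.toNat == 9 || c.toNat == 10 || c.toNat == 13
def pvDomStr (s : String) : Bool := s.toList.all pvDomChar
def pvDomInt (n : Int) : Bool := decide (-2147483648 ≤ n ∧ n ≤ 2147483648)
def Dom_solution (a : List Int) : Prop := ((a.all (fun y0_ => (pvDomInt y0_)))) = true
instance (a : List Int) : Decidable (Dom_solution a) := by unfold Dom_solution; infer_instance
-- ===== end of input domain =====

-- B replaces A's dict-of-character-counts (count chars, max of dict values, parse winning keys back
-- to ints, sort) by a fixed table over the ten possible digits: count each digit's occurrences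
-- directly, take the max, and emit the winning digits in ascending range order — no dict, no int
-- parsing, no final sort.

-- ===== PORT A =====
def solution (a : List Int) : List Int :=
  let strs := a.map (fun num => PySem.Int.toStr num)
  let nums := PySem.Str.join "" strs
  let counter := nums.toList.foldl (fun d digit =>
      if d.contains digit = false then d.insert digit 1 else d.modify digit 0 (· + 1))
    (PySem.Dict.empty : PySem.Dict Char Int)
  let maxOccured := (PySem.List.max? counter.values (fun v => v)).getD 0
  let listOfIndex := (counter.keys.filter (fun x => counter.getD x 0 == maxOccured)).map
    (fun x => (PySem.Int.ofChars? [x]).getD 0)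
  PySem.List.sorted listOfIndex (fun x => x) false

-- ===== PORT B =====
def solution_alt (a : List Int) : List Int :=
  let s := PySem.Str.join "" (a.map (fun n => PySem.Int.toStr n))
  let counts := (PySem.List.pyRange 0 10 1).map (fun d =>
    (d, s.toList.foldl (fun acc ch => if ([ch] == PySem.Int.toChars d) then acc + 1 else acc) (0 : Int)))
  let m := (PySem.List.max? (counts.map (fun p => p.2)) (fun v => v)).getD 0
  (counts.filter (fun p => p.2 == m)).map (fun p => p.1)

-- ===== PRECONDITION & SPEC =====
-- helpers for stating the precondition: the joined digit characters, the count of one character,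
-- and the maximum count attained by any of the ten decimal digit characters
def pvChars (a : List Int) : List Char := (a.map PySem.Int.toChars).flatten
def pvCnt (a : List Int) (c : Char) : Int := ((pvChars a).count c : Int)
def pvM (a : List Int) : Int := ((List.range 10).map (fun d => pvCnt a (Nat.digitChar d))).foldl max 0

-- Pre_ excludes exactly the inputs where A raises: the empty list (max() of an empty dict,
-- ValueError) and inputs whose '-' sign character is at least as frequent as every digit, where
-- int('-') raises ValueError. On a = [] the condition is 0 < 0, hence false.
def Pre_solution (a : List Int) : Prop := pvCnt a '-' < pvM a
instance (a : List Int) : Decidable (Pre_solution a) := by unfold Pre_solution; infer_instance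
def pvWitness_solution : List Int := [10]
def Spec_solution (a : List Int) (out : List Int) : Prop := out = solution_alt a
instance (a : List Int) (out : List Int) : Decidable (Spec_solution a out) := by unfold Spec_solution; infer_instance

-- ===== CLAIM (what is proved, stated in full; the proofs are below) =====
def Claim_equal_solution : Prop := ∀ (a : List Int), Dom_solution a → Pre_solution a → Spec_solution a (solution a)

-- ===== LEMMAS AND PROOFS =====

-- str(n) for n : Int is made of '-' and decimal digit characters
theorem pv_toDigitsCore_shape (fuel : Nat) : ∀ n ds, ∃ pref, Nat.toDigitsCore 10 fuel n ds = pref ++ ds ∧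
    (∀ c ∈ pref, ∃ d, d < 10 ∧ c = Nat.digitChar d) ∧ (0 < fuel → pref ≠ []) := by
  induction fuel with
  | zero => intro n ds; exact ⟨[], by simp [Nat.toDigitsCore]⟩
  | succ f ih =>
    intro n ds
    rw [Nat.toDigitsCore]
    by_cases h : n / 10 = 0
    · exact ⟨[Nat.digitChar (n % 10)], by simp [h], by
        intro c hc; simp at hc; exact ⟨n % 10, Nat.mod_lt _ (by norm_num), hc⟩, by simp⟩
    · simp only [h]
      obtain ⟨pref, he, hd, _⟩ := ih (n / 10) (Nat.digitChar (n % 10) :: ds)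
      refine ⟨pref ++ [Nat.digitChar (n % 10)], by simp [he], ?_, by simp⟩
      intro c hc
      rcases List.mem_append.1 hc with h1 | h1
      · exact hd c h1
      · simp at h1; exact ⟨n % 10, Nat.mod_lt _ (by norm_num), h1⟩

theorem pv_toChars_shape (n : Int) (c : Char) (hc : c ∈ PySem.Int.toChars n) :
    c = '-' ∨ ∃ d, d < 10 ∧ c = Nat.digitChar d := by
  unfold PySem.Int.toChars at hc
  split at hc
  · rcases List.mem_cons.1 hc with h | h
    · exact Or.inl h
    · obtain ⟨pref, he, hd, _⟩ := pv_toDigitsCore_shape (n.natAbs + 1) n.natAbs []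
      right; exact hd c (by simpa [Nat.toDigits, he] using h)
  · obtain ⟨pref, he, hd, _⟩ := pv_toDigitsCore_shape (n.toNat + 1) n.toNat []
    right; exact hd c (by simpa [Nat.toDigits, he] using hc)

theorem pv_chars_shape (a : List Int) (c : Char) (hc : c ∈ pvChars a) :
    c = '-' ∨ ∃ d, d < 10 ∧ c = Nat.digitChar d := by
  unfold pvChars at hc
  obtain ⟨l, hl, hcl⟩ := List.mem_flatten.1 hc
  obtain ⟨n, _, rfl⟩ := List.mem_map.1 hl
  exact pv_toChars_shape n c hcl

-- small decidable digit facts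
theorem pv_parse_digit (d : Nat) (h : d < 10) : (PySem.Int.ofChars? [Nat.digitChar d]).getD 0 = (d : Int) := by
  interval_cases d <;> decide

theorem pv_toChars_small (d : Int) (h0 : 0 ≤ d) (h1 : d < 10) :
    PySem.Int.toChars d = [Nat.digitChar d.toNat] := by
  interval_cases d <;> decide

-- "".join of the string forms is the flattened character list
theorem pv_flat_inter {α : Type} (xs : List (List α)) : (List.intersperse [] xs).flatten = xs.flatten := by
  induction xs with
  | nil => simp
  | cons a t ih =>
    cases t with
    | nil => simp
    | cons b t' => simp_all [List.intersperse]

theorem pv_join_toList (a : List Int) :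
    (PySem.Str.join "" (a.map (fun n => PySem.Int.toStr n))).toList = pvChars a := by
  simp [PySem.Str.toList_join, PySem.Chars.join, List.intercalate, pv_flat_inter, pvChars,
    List.map_map, Function.comp_def, PySem.Int.toList_toStr]

-- A's counting loop is collections.Counter
theorem pv_counterA (L : List Char) :
    L.foldl (fun d digit => if d.contains digit = false then d.insert digit 1 else d.modify digit 0 (· + 1))
      (PySem.Dict.empty : PySem.Dict Char Int) = PySem.Dict.counter L := by
  rw [PySem.Dict.counter_eq_foldl]
  apply PySem.List.foldl_congr_mem
  intro acc x _
  by_cases h : acc.contains x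
  · simp [h]
  · simp only [Bool.not_eq_true] at h
    simp [h, PySem.Dict.modify, PySem.Dict.getD_of_not_contains acc (0 : Int) h]

-- bounds on pvM
theorem pv_ten_le (a : List Int) (d : Nat) (h : d < 10) : pvCnt a (Nat.digitChar d) ≤ pvM a := by
  have hmem : pvCnt a (Nat.digitChar d) ∈ (List.range 10).map (fun d => pvCnt a (Nat.digitChar d)) :=
    List.mem_map.2 ⟨d, List.mem_range.2 h, rfl⟩
  exact (PySem.List.le_foldl_max _ 0).2 _ hmem

theorem pv_M_attained (a : List Int) (hpre : Pre_solution a) :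
    ∃ d, d < 10 ∧ pvCnt a (Nat.digitChar d) = pvM a := by
  have h0 : (0 : Int) ≤ pvCnt a '-' := by unfold pvCnt; positivity
  have hM : 0 < pvM a := lt_of_le_of_lt h0 hpre
  have hmm := PySem.List.foldl_max_mem ((List.range 10).map (fun d => pvCnt a (Nat.digitChar d))) 0
  rw [show ((List.range 10).map (fun d => pvCnt a (Nat.digitChar d))).foldl max 0 = pvM a from rfl] at hmm
  rcases hmm with h | h
  · omega
  · obtain ⟨d, hd, he⟩ := List.mem_map.1 h
    exact ⟨d, List.mem_range.1 hd, he⟩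

theorem pv_M_pos (a : List Int) (hpre : Pre_solution a) : 0 < pvM a := by
  have h0 : (0 : Int) ≤ pvCnt a '-' := by unfold pvCnt; positivity
  exact lt_of_le_of_lt h0 hpre

-- any character's count is at most pvM, under Pre_
theorem pv_cnt_le (a : List Int) (hpre : Pre_solution a) (c : Char) (hc : c ∈ pvChars a) :
    pvCnt a c ≤ pvM a := by
  rcases pv_chars_shape a c hc with rfl | ⟨d, hd, rfl⟩
  · exact le_of_lt hpre
  · exact pv_ten_le a d hd

-- A's max(counter.values()) is pvM
theorem pv_maxA (a : List Int) (hpre : Pre_solution a) :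
    PySem.List.max? ((PySem.Dict.counter (pvChars a)).values) (fun v => v) = some (pvM a) := by
  have hvals : (PySem.Dict.counter (pvChars a)).values
      = (PySem.Set.ofList (pvChars a)).map (fun k => ((pvChars a).count k : Int)) := by
    simp only [PySem.Dict.values, PySem.Dict.items_counter, List.map_map, Function.comp_def]
  obtain ⟨d0, hd0, he0⟩ := pv_M_attained a hpre
  have hmemL : Nat.digitChar d0 ∈ pvChars a := by
    have : 0 < (pvChars a).count (Nat.digitChar d0) := by
      have := pv_M_pos a hpre
      unfold pvCnt at he0; omega
    exact List.count_pos_iff.1 this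
  have hMmem : pvM a ∈ (PySem.Dict.counter (pvChars a)).values := by
    rw [hvals]
    exact List.mem_map.2 ⟨Nat.digitChar d0, (PySem.Set.mem_ofList _ _).2 hmemL, he0⟩
  cases hmax : PySem.List.max? ((PySem.Dict.counter (pvChars a)).values) (fun v => v) with
  | none => rw [PySem.List.max?_eq_none_iff] at hmax; simp [hmax] at hMmem
  | some v =>
    have hv1 : v ∈ (PySem.Dict.counter (pvChars a)).values := PySem.List.max?_mem hmax
    have hv2 := PySem.List.max?_isMax hmax
    have hvle : v ≤ pvM a := by
      rw [hvals] at hv1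
      obtain ⟨k, hk, rfl⟩ := List.mem_map.1 hv1
      exact pv_cnt_le a hpre k ((PySem.Set.mem_ofList _ _).1 hk)
    have hlev : pvM a ≤ v := hv2 _ hMmem
    simp [le_antisymm hvle hlev]

-- B's per-digit counting loop counts exactly that digit's character
theorem pv_countsB (a : List Int) (d : Int) (h0 : 0 ≤ d) (h1 : d < 10) :
    (pvChars a).foldl (fun acc ch => if ([ch] == PySem.Int.toChars d) then acc + 1 else acc) (0 : Int)
      = pvCnt a (Nat.digitChar d.toNat) := by
  rw [pv_toChars_small d h0 h1]
  have hcong : (pvChars a).foldl (fun acc ch => if ([ch] == [Nat.digitChar d.toNat]) then acc + 1 else acc) (0 : Int)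
      = (pvChars a).foldl (fun acc ch => if (ch == Nat.digitChar d.toNat) then acc + 1 else acc) (0 : Int) := by
    apply PySem.List.foldl_congr_mem
    intro acc x _
    cases h : x == Nat.digitChar d.toNat <;> simp_all
  rw [hcong, PySem.List.foldl_beq_add_one]
  simp [pvCnt]

-- B's max(counts) is pvM
theorem pv_maxB (a : List Int) (hpre : Pre_solution a) :
    PySem.List.max? ((PySem.List.pyRange 0 10 1).map (fun d => pvCnt a (Nat.digitChar d.toNat))) (fun v => v)
      = some (pvM a) := by
  obtain ⟨d0, hd0, he0⟩ := pv_M_attained a hpre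
  have hMmem : pvM a ∈ (PySem.List.pyRange 0 10 1).map (fun d => pvCnt a (Nat.digitChar d.toNat)) := by
    refine List.mem_map.2 ⟨(d0 : Int), PySem.List.mem_pyRange_one.2 ⟨by positivity, by exact_mod_cast hd0⟩, ?_⟩
    simpa using he0
  cases hmax : PySem.List.max? ((PySem.List.pyRange 0 10 1).map (fun d => pvCnt a (Nat.digitChar d.toNat))) (fun v => v) with
  | none => rw [PySem.List.max?_eq_none_iff] at hmax; simp [hmax] at hMmem
  | some v =>
    have hv1 := PySem.List.max?_mem hmax
    have hv2 := PySem.List.max?_isMax hmax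
    have hvle : v ≤ pvM a := by
      obtain ⟨k, hk, rfl⟩ := List.mem_map.1 hv1
      obtain ⟨hk0, hk1⟩ := PySem.List.mem_pyRange_one.1 hk
      exact pv_ten_le a k.toNat (by omega)
    have hlev : pvM a ≤ v := hv2 _ hMmem
    simp [le_antisymm hvle hlev]

-- ===== VERDICT (by name: the statement is the Claim_ definition above) =====
theorem solution_spec : Claim_equal_solution := by
  intro a _ hpre
  unfold Spec_solution solution solution_alt
  simp only []
  rw [pv_join_toList, pv_counterA]
  rw [pv_maxA a hpre]
  -- rewrite B's counts
  have hcounts : (PySem.List.pyRange 0 10 1).map (fun d =>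
      (d, (pvChars a).foldl (fun acc ch => if ([ch] == PySem.Int.toChars d) then acc + 1 else acc) (0 : Int)))
      = (PySem.List.pyRange 0 10 1).map (fun d => (d, pvCnt a (Nat.digitChar d.toNat))) := by
    apply List.map_congr_left
    intro d hd
    obtain ⟨h0, h1⟩ := PySem.List.mem_pyRange_one.1 hd
    rw [pv_countsB a d h0 h1]
  rw [hcounts]
  have hmB : ((PySem.List.pyRange 0 10 1).map (fun d => (d, pvCnt a (Nat.digitChar d.toNat)))).map (fun p => p.2)
      = (PySem.List.pyRange 0 10 1).map (fun d => pvCnt a (Nat.digitChar d.toNat)) := by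
    simp [List.map_map, Function.comp_def]
  rw [hmB, pv_maxB a hpre]
  simp only [Option.getD_some]
  -- B's result as a filter over the range
  have hB : (((PySem.List.pyRange 0 10 1).map (fun d => (d, pvCnt a (Nat.digitChar d.toNat)))).filter
        (fun p => p.2 == pvM a)).map (fun p => p.1)
      = (PySem.List.pyRange 0 10 1).filter (fun d => pvCnt a (Nat.digitChar d.toNat) == pvM a) := by
    rw [List.filter_map]
    simp [List.map_map, Function.comp_def]
  rw [hB]
  -- A's winners list
  rw [PySem.Dict.keys_counter]
  have hgetD : ∀ k, (PySem.Dict.counter (pvChars a)).getD k 0 = ((pvChars a).count k : Int) :=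
    fun k => PySem.Dict.getD_counter (pvChars a) k
  have hW : (PySem.Set.ofList (pvChars a)).filter (fun x => (PySem.Dict.counter (pvChars a)).getD x 0 == pvM a)
      = (PySem.Set.ofList (pvChars a)).filter (fun x => pvCnt a x == pvM a) := by
    apply List.filter_congr
    intro x _
    rw [hgetD x]; rfl
  rw [hW]
  -- the two winner lists are permutations, and B's is strictly increasing
  set W := ((PySem.Set.ofList (pvChars a)).filter (fun x => pvCnt a x == pvM a)).map
    (fun x => (PySem.Int.ofChars? [x]).getD 0) with hWdef
  set B := (PySem.List.pyRange 0 10 1).filter (fun d => pvCnt a (Nat.digitChar d.toNat) == pvM a) with hBdef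
  -- every winner character is a digit character
  have hwin : ∀ x ∈ (PySem.Set.ofList (pvChars a)).filter (fun x => pvCnt a x == pvM a),
      ∃ d, d < 10 ∧ x = Nat.digitChar d := by
    intro x hx
    obtain ⟨hx1, hx2⟩ := List.mem_filter.1 hx
    have hxL : x ∈ pvChars a := (PySem.Set.mem_ofList _ _).1 hx1
    have hxM : pvCnt a x = pvM a := by simpa using hx2
    rcases pv_chars_shape a x hxL with rfl | hd
    · refine absurd hxM ?_
      have h' := hpre; unfold Pre_solution at h'; omega
    · exact hd
  have hnodupW : W.Nodup := by
    apply List.Nodup.map_on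
    · intro x hx y hy hxy
      obtain ⟨dx, hdx, rfl⟩ := hwin x hx
      obtain ⟨dy, hdy, rfl⟩ := hwin y hy
      rw [pv_parse_digit dx hdx, pv_parse_digit dy hdy] at hxy
      have hdd : dx = dy := by exact_mod_cast hxy
      rw [hdd]
    · exact (PySem.Set.nodup_ofList _).filter _
  have hpairB : B.Pairwise (fun x y => x < y) :=
    (PySem.List.pairwise_lt_pyRange_one 0 10).filter _
  have hnodupB : B.Nodup := hpairB.imp (fun h => ne_of_lt h)
  have hmemiff : ∀ x, x ∈ B ↔ x ∈ W := by
    intro x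
    constructor
    · intro hx
      obtain ⟨hx1, hx2⟩ := List.mem_filter.1 hx
      obtain ⟨h0, h1⟩ := PySem.List.mem_pyRange_one.1 hx1
      have hxM : pvCnt a (Nat.digitChar x.toNat) = pvM a := by simpa using hx2
      have hmemL : Nat.digitChar x.toNat ∈ pvChars a := by
        have hMpos := pv_M_pos a hpre
        have : 0 < (pvChars a).count (Nat.digitChar x.toNat) := by unfold pvCnt at hxM; omega
        exact List.count_pos_iff.1 this
      refine List.mem_map.2 ⟨Nat.digitChar x.toNat, List.mem_filter.2 ⟨(PySem.Set.mem_ofList _ _).2 hmemL, by simpa using hxM⟩, ?_⟩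
      rw [pv_parse_digit x.toNat (by omega)]
      omega
    · intro hx
      obtain ⟨k, hk, rfl⟩ := List.mem_map.1 hx
      obtain ⟨d, hd, rfl⟩ := hwin k hk
      obtain ⟨hk1, hk2⟩ := List.mem_filter.1 hk
      rw [pv_parse_digit d hd]
      refine List.mem_filter.2 ⟨PySem.List.mem_pyRange_one.2 ⟨by positivity, by exact_mod_cast hd⟩, ?_⟩
      simpa using hk2
  have hperm : B.Perm W := (List.perm_ext_iff_of_nodup hnodupB hnodupW).2 hmemiff
  exact PySem.List.sorted_eq_of_perm_of_pairwise_lt W B (fun x => x) hperm hpairB
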